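-- pv_equiv track=rewrite | github.com/Cremator-2/BoxFinder | main.py | find_nearest_coordinate
-- ===== SOURCE A (Python) =====
-- def find_nearest_coordinate(start_coord, list_destination_coordinates):
--     """
--     Здесь нахожу ближайшую координату из списка list_destination_coordinates по отношению к стартовой.
--     Из-за того, что Кот может передвигаться диагонально - дистанция перемещения определяется только
--     большей стороной условного треугольника
--     """
--     distance = []
--     for l_b in list_destination_coordinates:
--         distance_x = abs(start_coord[0] - l_b[0])
--         distance_y = abs(start_coord[1] - l_b[1])
--         if distance_y > distance_x:
--             distance.append(distance_y)
--         else: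
--             distance.append(distance_x)
--
--     list_destination_coordinates = [x for _, x in sorted(zip(distance, list_destination_coordinates))]
--
--     return list_destination_coordinates[0]
-- ===== SOURCE B (Python) =====
-- def find_nearest_coordinate(start_coord, list_destination_coordinates):
--     best = list_destination_coordinates[0]
--     best_d = max(abs(start_coord[0] - best[0]), abs(start_coord[1] - best[1]))
--     for c in list_destination_coordinates[1:]:
--         d = max(abs(start_coord[0] - c[0]), abs(start_coord[1] - c[1]))
--         if d < best_d or (d == best_d and c < best):
--             best, best_d = c, d
--     return best
-- ===== Notes on version B (the rewrite author's own statement) =====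
-- stated objective: alternative
-- what changed: Replaces A's build-a-distance-list / zip / full sort / take-first pipeline with a single selection scan that keeps the running minimum of the (Chebyshev distance, coordinate) tuple, allocating no auxiliary lists; C-implemented Timsort makes A's pipeline comparable in wall time despite the asymptotic gap.
import Mathlib
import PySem

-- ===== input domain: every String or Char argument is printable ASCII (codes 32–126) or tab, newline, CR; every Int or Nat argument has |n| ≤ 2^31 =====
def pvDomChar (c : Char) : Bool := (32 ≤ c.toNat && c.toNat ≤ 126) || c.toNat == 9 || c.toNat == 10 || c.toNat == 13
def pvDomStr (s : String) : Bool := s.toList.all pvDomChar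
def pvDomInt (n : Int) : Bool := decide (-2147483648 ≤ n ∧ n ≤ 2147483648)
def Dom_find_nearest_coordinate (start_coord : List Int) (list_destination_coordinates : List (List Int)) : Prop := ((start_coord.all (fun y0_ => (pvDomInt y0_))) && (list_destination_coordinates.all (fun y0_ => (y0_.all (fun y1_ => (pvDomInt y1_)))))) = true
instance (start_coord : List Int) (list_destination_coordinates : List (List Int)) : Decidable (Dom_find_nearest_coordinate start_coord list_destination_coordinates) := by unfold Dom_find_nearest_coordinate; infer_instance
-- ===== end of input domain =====

-- B replaces A's build-distance-list / zip / full sort with a single selection scan keeping the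
-- running (distance, coordinate)-minimum; objective: alternative (no sort, no auxiliary lists).

-- ===== PORT A =====
-- literal transliteration of A: build the distance list, sort zip(distance, coords)
-- by Python's tuple order (sorted2 with keys fst, snd), map out the coordinates, take [0].
-- pyGetD with a junk default is used where Python indexes; Pre_ keeps every index in range.
def find_nearest_coordinate (start_coord : List Int) (list_destination_coordinates : List (List Int)) : List Int :=
  let distance : List Int := list_destination_coordinates.foldl (fun acc l_b =>
    let distance_x : Int := |PySem.List.pyGetD start_coord 0 0 - PySem.List.pyGetD l_b 0 0|
    let distance_y : Int := |PySem.List.pyGetD start_coord 1 0 - PySem.List.pyGetD l_b 1 0|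
    if distance_y > distance_x then acc ++ [distance_y] else acc ++ [distance_x]) []
  let result := (PySem.List.sorted2 (distance.zip list_destination_coordinates) Prod.fst Prod.snd).map Prod.snd
  PySem.List.pyGetD result 0 []

-- ===== PORT B =====
-- literal transliteration of Source B: seed best from index 0, one pass over lst[1:] (= drop 1,
-- exact for this slice), update when (d, c) is lexicographically below (best_d, best).
def find_nearest_coordinate_alt (start_coord : List Int) (list_destination_coordinates : List (List Int)) : List Int :=
  let best0 := PySem.List.pyGetD list_destination_coordinates 0 []
  let bd0 : Int := max |PySem.List.pyGetD start_coord 0 0 - PySem.List.pyGetD best0 0 0|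
                       |PySem.List.pyGetD start_coord 1 0 - PySem.List.pyGetD best0 1 0|
  let r := (list_destination_coordinates.drop 1).foldl
    (fun (st : List Int × Int) c =>
      let d : Int := max |PySem.List.pyGetD start_coord 0 0 - PySem.List.pyGetD c 0 0|
                         |PySem.List.pyGetD start_coord 1 0 - PySem.List.pyGetD c 1 0|
      if decide (d < st.2) || (decide (d = st.2) && decide (c < st.1)) then (c, d) else st)
    (best0, bd0)
  r.1

-- ===== PRECONDITION & SPEC =====
-- Pre_: exactly where the Python A returns normally — a nonempty list (else list[0] raises
-- IndexError) and both start_coord and every destination long enough for indices 0 and 1.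
def Pre_find_nearest_coordinate (start_coord : List Int) (list_destination_coordinates : List (List Int)) : Prop :=
  list_destination_coordinates ≠ [] ∧ 2 ≤ start_coord.length ∧
    ∀ c ∈ list_destination_coordinates, 2 ≤ c.length
instance (start_coord : List Int) (list_destination_coordinates : List (List Int)) : Decidable (Pre_find_nearest_coordinate start_coord list_destination_coordinates) := by unfold Pre_find_nearest_coordinate; infer_instance
def pvWitness_find_nearest_coordinate : List Int × List (List Int) := ([0, 0], [[1, 1], [0, 2]])
def Spec_find_nearest_coordinate (start_coord : List Int) (list_destination_coordinates : List (List Int)) (out : List Int) : Prop := out = find_nearest_coordinate_alt start_coord list_destination_coordinates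
instance (start_coord : List Int) (list_destination_coordinates : List (List Int)) (out : List Int) : Decidable (Spec_find_nearest_coordinate start_coord list_destination_coordinates out) := by unfold Spec_find_nearest_coordinate; infer_instance

-- ===== CLAIM (what is proved, stated in full; the proofs are below) =====
def Claim_equal_find_nearest_coordinate : Prop := ∀ (start_coord : List Int) (list_destination_coordinates : List (List Int)), Dom_find_nearest_coordinate start_coord list_destination_coordinates → Pre_find_nearest_coordinate start_coord list_destination_coordinates → Spec_find_nearest_coordinate start_coord list_destination_coordinates (find_nearest_coordinate start_coord list_destination_coordinates)

-- ===== LEMMAS AND PROOFS =====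

-- Chebyshev distance as A writes it (branch form)
def pvCheb (s c : List Int) : Int :=
  if |PySem.List.pyGetD s 1 0 - PySem.List.pyGetD c 1 0| >
     |PySem.List.pyGetD s 0 0 - PySem.List.pyGetD c 0 0|
  then |PySem.List.pyGetD s 1 0 - PySem.List.pyGetD c 1 0|
  else |PySem.List.pyGetD s 0 0 - PySem.List.pyGetD c 0 0|

-- the tuple comparison sorted2 (reverse = false) uses on (dist, coord) pairs
def pvLtF (a b : Int × List Int) : Bool :=
  decide (a.1 < b.1) || (!decide (b.1 < a.1) && decide (a.2 < b.2))

-- one step of the selection scan, on the pair side and on B's (coord, dist) side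
def pvStepP (b x : Int × List Int) : Int × List Int := if pvLtF x b then x else b

def pvStepB (s : List Int) (st : List Int × Int) (c : List Int) : List Int × Int :=
  if decide (pvCheb s c < st.2) || (decide (pvCheb s c = st.2) && decide (c < st.1))
  then (c, pvCheb s c) else st

lemma pvCheb_eq_max (s c : List Int) :
    pvCheb s c = max |PySem.List.pyGetD s 0 0 - PySem.List.pyGetD c 0 0|
                     |PySem.List.pyGetD s 1 0 - PySem.List.pyGetD c 1 0| := by
  unfold pvCheb; split <;> omega

lemma pvDistance_eq_map (s : List Int) (xs : List (List Int)) (acc : List Int) :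
    xs.foldl (fun acc l_b =>
      if |PySem.List.pyGetD s 1 0 - PySem.List.pyGetD l_b 1 0| >
         |PySem.List.pyGetD s 0 0 - PySem.List.pyGetD l_b 0 0|
      then acc ++ [|PySem.List.pyGetD s 1 0 - PySem.List.pyGetD l_b 1 0|]
      else acc ++ [|PySem.List.pyGetD s 0 0 - PySem.List.pyGetD l_b 0 0|]) acc
    = acc ++ xs.map (pvCheb s) := by
  have hfun : (fun (acc : List Int) (l_b : List Int) =>
      if |PySem.List.pyGetD s 1 0 - PySem.List.pyGetD l_b 1 0| >
         |PySem.List.pyGetD s 0 0 - PySem.List.pyGetD l_b 0 0|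
      then acc ++ [|PySem.List.pyGetD s 1 0 - PySem.List.pyGetD l_b 1 0|]
      else acc ++ [|PySem.List.pyGetD s 0 0 - PySem.List.pyGetD l_b 0 0|])
      = (fun acc x => acc ++ [pvCheb s x]) := by
    funext a x; unfold pvCheb; split <;> rfl
  rw [hfun, PySem.List.foldl_append_singleton_eq_map]

-- head of the insertion-sort foldl = selection scan over the same elements
lemma pvHead_foldl_insertBy (before : (Int × List Int) → (Int × List Int) → Bool)
    (xs : List (Int × List Int)) (a : Int × List Int) (t : List (Int × List Int)) :
    (xs.foldl (fun acc x => PySem.List.insertBy before x acc) (a :: t)).head? =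
      some (xs.foldl (fun b x => if before x b then x else b) a) := by
  induction xs generalizing a t with
  | nil => rfl
  | cons x xs ih =>
    simp only [List.foldl_cons, PySem.List.insertBy]
    by_cases h : before x a
    · simp only [h, if_true]
      exact ih x (a :: t)
    · simp only [h, Bool.false_eq_true, if_false]
      exact ih a (PySem.List.insertBy before x t)

-- one scan step, transported between the two state representations
lemma pvStep_point (s c : List Int) (b : Int × List Int) :
    ((pvStepP b (pvCheb s c, c)).2, (pvStepP b (pvCheb s c, c)).1) = pvStepB s (b.2, b.1) c := by
  unfold pvStepP pvStepB pvLtF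
  rcases lt_trichotomy (pvCheb s c) b.1 with h | h | h
  · simp [h, not_lt_of_gt h]
  · by_cases h2 : c < b.2 <;> simp [h, h2]
  · simp [h, not_lt_of_gt h, ne_of_gt h]

-- the whole scan, transported
lemma pvScan_transport (s : List Int) (rest : List (List Int)) (b : Int × List Int) :
    (((rest.map (fun c => (pvCheb s c, c))).foldl pvStepP b).2,
     ((rest.map (fun c => (pvCheb s c, c))).foldl pvStepP b).1)
    = rest.foldl (pvStepB s) (b.2, b.1) := by
  induction rest generalizing b with
  | nil => rfl
  | cons c rest ih =>
    simp only [List.map_cons, List.foldl_cons]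
    rw [ih (pvStepP b (pvCheb s c, c)), pvStep_point]

-- sorted2 with keys fst, snd is the insertBy foldl with comparison pvLtF
lemma pvSorted2_eq (xs : List (Int × List Int)) :
    PySem.List.sorted2 xs Prod.fst Prod.snd
      = xs.foldl (fun acc x => PySem.List.insertBy pvLtF x acc) [] := rfl

-- B's loop body is pvStepB (the max form of the distance folded in)
lemma pvFoldB_eq (s : List Int) (rest : List (List Int)) (st0 : List Int × Int) :
    rest.foldl (fun (st : List Int × Int) c =>
      if decide ((max |PySem.List.pyGetD s 0 0 - PySem.List.pyGetD c 0 0|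
                      |PySem.List.pyGetD s 1 0 - PySem.List.pyGetD c 1 0|) < st.2)
         || (decide ((max |PySem.List.pyGetD s 0 0 - PySem.List.pyGetD c 0 0|
                          |PySem.List.pyGetD s 1 0 - PySem.List.pyGetD c 1 0|) = st.2)
             && decide (c < st.1))
      then (c, max |PySem.List.pyGetD s 0 0 - PySem.List.pyGetD c 0 0|
                   |PySem.List.pyGetD s 1 0 - PySem.List.pyGetD c 1 0|)
      else st) st0
    = rest.foldl (pvStepB s) st0 := by
  have hfun : (fun (st : List Int × Int) (c : List Int) =>
      if decide ((max |PySem.List.pyGetD s 0 0 - PySem.List.pyGetD c 0 0|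
                      |PySem.List.pyGetD s 1 0 - PySem.List.pyGetD c 1 0|) < st.2)
         || (decide ((max |PySem.List.pyGetD s 0 0 - PySem.List.pyGetD c 0 0|
                          |PySem.List.pyGetD s 1 0 - PySem.List.pyGetD c 1 0|) = st.2)
             && decide (c < st.1))
      then (c, max |PySem.List.pyGetD s 0 0 - PySem.List.pyGetD c 0 0|
                   |PySem.List.pyGetD s 1 0 - PySem.List.pyGetD c 1 0|)
      else st) = pvStepB s := by
    funext st c; unfold pvStepB; rw [pvCheb_eq_max]
  rw [hfun]

-- ===== VERDICT (by name: the statement is the Claim_ definition above) =====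
theorem find_nearest_coordinate_spec : Claim_equal_find_nearest_coordinate := by
  intro s xs _ hpre
  obtain ⟨hne, -, -⟩ := hpre
  unfold Spec_find_nearest_coordinate
  cases xs with
  | nil => exact absurd rfl hne
  | cons c rest =>
    simp only [find_nearest_coordinate, find_nearest_coordinate_alt]
    rw [pvDistance_eq_map]
    have hzip : (([] : List Int) ++ (c :: rest).map (pvCheb s)).zip (c :: rest)
        = (c :: rest).map (fun x => (pvCheb s x, x)) := by
      simpa using (@List.zip_map' (List Int) Int (List Int) (pvCheb s) id (c :: rest))
    rw [hzip, pvSorted2_eq]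
    simp only [List.map_cons, List.foldl_cons]
    have hfirst : PySem.List.insertBy pvLtF (pvCheb s c, c) [] = [(pvCheb s c, c)] := rfl
    rw [hfirst]
    have hfold := pvHead_foldl_insertBy pvLtF (rest.map (fun x => (pvCheb s x, x))) (pvCheb s c, c) []
    set L := (rest.map (fun x => (pvCheb s x, x))).foldl
      (fun acc x => PySem.List.insertBy pvLtF x acc) [(pvCheb s c, c)] with hL
    obtain ⟨l', hl'⟩ : ∃ l', L = (rest.map (fun x => (pvCheb s x, x))).foldl
        (fun b x => if pvLtF x b then x else b) (pvCheb s c, c) :: l' := by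
      cases hLc : L with
      | nil => rw [hLc] at hfold; simp at hfold
      | cons a b =>
        rw [hLc] at hfold
        simp only [List.head?_cons, Option.some.injEq] at hfold
        exact ⟨b, by rw [hfold]⟩
    rw [hl']
    have hget : ∀ (m : Int × List Int) (l' : List (Int × List Int)),
        PySem.List.pyGetD ((m :: l').map Prod.snd) 0 [] = m.2 := by
      intro m l'
      simp [PySem.List.pyGetD, PySem.List.pyGet?, PySem.List.pyIdx?]
    rw [hget]
    have hgetc : PySem.List.pyGetD (c :: rest) 0 ([] : List Int) = c := by
      simp [PySem.List.pyGetD, PySem.List.pyGet?, PySem.List.pyIdx?]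
    rw [hgetc]
    simp only [List.drop_succ_cons, List.drop_zero]
    rw [pvFoldB_eq]
    have hstart : (c, max |PySem.List.pyGetD s 0 0 - PySem.List.pyGetD c 0 0|
                         |PySem.List.pyGetD s 1 0 - PySem.List.pyGetD c 1 0|)
        = (c, pvCheb s c) := by rw [pvCheb_eq_max]
    rw [hstart]
    have htrans := pvScan_transport s rest (pvCheb s c, c)
    have hfoldeq : (rest.map (fun x => (pvCheb s x, x))).foldl
        (fun b x => if pvLtF x b then x else b) (pvCheb s c, c)
        = (rest.map (fun c => (pvCheb s c, c))).foldl pvStepP (pvCheb s c, c) := rfl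
    rw [hfoldeq, ← htrans]
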